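-- pv_equiv track=rewrite | github.com/rishimj/prism-plm | src/analysis/go_enrichment.py | get_top_go_terms
-- ===== SOURCE A (Python) =====
-- from typing import Any, Dict, List, Optional, Set, Tuple
-- from collections import defaultdict
--
-- def get_top_go_terms(
--     enrichment_results: List[Dict[str, Any]],
--     n_terms: int = 5,
--     per_namespace: bool = False,
-- ) -> List[str]:
--     """Extract top enriched GO term names for description.
--
--     Args:
--         enrichment_results: Results from perform_go_enrichment()
--         n_terms: Number of top terms to return
--         per_namespace: If True, return n_terms per namespace
--
--     Returns:
--         List of GO term names
--     """
--     if not enrichment_results: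
--         return []
--
--     if per_namespace:
--         # Get top N per namespace
--         by_namespace = defaultdict(list)
--         for result in enrichment_results:
--             by_namespace[result["namespace"]].append(result)
--
--         terms = []
--         for ns in ["biological_process", "molecular_function", "cellular_component"]:
--             ns_results = by_namespace.get(ns, [])
--             for result in ns_results[:n_terms]:
--                 terms.append(result["go_name"])
--
--         return terms
--     else:
--         # Get overall top N
--         return [r["go_name"] for r in enrichment_results[:n_terms]]
-- ===== SOURCE B (Python) =====
-- def get_top_go_terms(
--     enrichment_results,
--     n_terms=5,
--     per_namespace=False,
-- ):
--     """Extract top enriched GO term names (B: filtered scans per namespace, no defaultdict index)."""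
--     if not enrichment_results:
--         return []
--
--     if per_namespace:
--         terms = []
--         for ns in ("biological_process", "molecular_function", "cellular_component"):
--             matching = [r for r in enrichment_results if r["namespace"] == ns]
--             terms.extend(r["go_name"] for r in matching[:n_terms])
--         return terms
--     else:
--         return [r["go_name"] for r in enrichment_results[:n_terms]]
-- ===== Notes on version B (the rewrite author's own statement) =====
-- stated objective: simpler
-- what changed: Replaces the defaultdict grouping pass (build index, then look up each namespace) with three direct order-preserving filtered scans of the input, one per namespace; no intermediate dict is built.
import Mathlib
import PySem

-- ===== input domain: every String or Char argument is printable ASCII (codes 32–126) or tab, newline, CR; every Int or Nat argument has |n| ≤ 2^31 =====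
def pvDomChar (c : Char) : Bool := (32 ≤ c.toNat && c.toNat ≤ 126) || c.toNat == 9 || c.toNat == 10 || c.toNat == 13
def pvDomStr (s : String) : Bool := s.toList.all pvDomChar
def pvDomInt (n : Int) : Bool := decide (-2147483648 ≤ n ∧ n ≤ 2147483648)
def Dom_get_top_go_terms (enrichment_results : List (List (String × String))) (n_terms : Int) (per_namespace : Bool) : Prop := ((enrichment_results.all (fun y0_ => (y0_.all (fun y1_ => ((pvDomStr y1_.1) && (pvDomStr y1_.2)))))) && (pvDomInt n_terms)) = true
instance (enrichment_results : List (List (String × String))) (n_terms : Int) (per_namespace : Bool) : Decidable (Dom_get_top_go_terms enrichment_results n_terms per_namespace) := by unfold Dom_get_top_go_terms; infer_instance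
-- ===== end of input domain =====

-- B drops A's defaultdict grouping pass in the per-namespace branch and instead does one
-- order-preserving filtered scan of the input per namespace (objective: simpler).


-- shared primitive: Python's result["namespace"] / result["go_name"] lookups (first match;
-- the "" default is never reached inside Pre_, where the key is present wherever it is read)
def pvNsOf (r : List (String × String)) : String := (PySem.Dict.mk r).getD "namespace" ""
def pvGnOf (r : List (String × String)) : String := (PySem.Dict.mk r).getD "go_name" ""

def pvNamespaces : List String := ["biological_process", "molecular_function", "cellular_component"]

-- ===== PORT A =====
def get_top_go_terms (enrichment_results : List (List (String × String))) (n_terms : Int) (per_namespace : Bool) : List String :=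
  if enrichment_results = [] then []
  else if per_namespace then
    -- by_namespace = defaultdict(list); for result: by_namespace[result["namespace"]].append(result)
    let by_namespace : PySem.Dict String (List (List (String × String))) :=
      enrichment_results.foldl (fun d r => d.modify (pvNsOf r) [] (· ++ [r])) PySem.Dict.empty
    -- terms = []; for ns in [...]: for result in by_namespace.get(ns, [])[:n_terms]: terms.append(...)
    pvNamespaces.foldl (fun terms ns =>
      (PySem.List.slice (by_namespace.getD ns []) none (some n_terms)).foldl
        (fun t r => t ++ [pvGnOf r]) terms) []
  else
    (PySem.List.slice enrichment_results none (some n_terms)).map pvGnOf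

-- ===== PORT B =====
def get_top_go_terms_alt (enrichment_results : List (List (String × String))) (n_terms : Int) (per_namespace : Bool) : List String :=
  if enrichment_results = [] then []
  else if per_namespace then
    -- for ns in (...): matching = [r for r in enrichment_results if r["namespace"] == ns];
    --                  terms.extend(r["go_name"] for r in matching[:n_terms])
    pvNamespaces.foldl (fun terms ns =>
      terms ++ (PySem.List.slice (enrichment_results.filter (fun r => pvNsOf r == ns))
                  none (some n_terms)).map pvGnOf) []
  else
    (PySem.List.slice enrichment_results none (some n_terms)).map pvGnOf

-- ===== PRECONDITION & SPEC =====
-- Pre_ excludes exactly the inputs where Python raises KeyError: a "namespace" lookup on any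
-- row (per_namespace branch), or a "go_name" lookup on a row inside one of the read slices.
def Pre_get_top_go_terms (enrichment_results : List (List (String × String))) (n_terms : Int) (per_namespace : Bool) : Prop :=
  if per_namespace then
    (∀ r ∈ enrichment_results, ((PySem.Dict.mk r).get? "namespace").isSome) ∧
    (∀ ns ∈ pvNamespaces, ∀ r ∈ PySem.List.slice (enrichment_results.filter (fun r => pvNsOf r == ns)) none (some n_terms),
        ((PySem.Dict.mk r).get? "go_name").isSome)
  else
    ∀ r ∈ PySem.List.slice enrichment_results none (some n_terms), ((PySem.Dict.mk r).get? "go_name").isSome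
instance (enrichment_results : List (List (String × String))) (n_terms : Int) (per_namespace : Bool) : Decidable (Pre_get_top_go_terms enrichment_results n_terms per_namespace) := by unfold Pre_get_top_go_terms; infer_instance

def pvWitness_get_top_go_terms : (List (List (String × String))) × Int × Bool :=
  ([[("namespace", "biological_process"), ("go_name", "apoptosis")],
    [("namespace", "molecular_function"), ("go_name", "binding")]], 5, true)

def Spec_get_top_go_terms (enrichment_results : List (List (String × String))) (n_terms : Int) (per_namespace : Bool) (out : List String) : Prop := out = get_top_go_terms_alt enrichment_results n_terms per_namespace
instance (enrichment_results : List (List (String × String))) (n_terms : Int) (per_namespace : Bool) (out : List String) : Decidable (Spec_get_top_go_terms enrichment_results n_terms per_namespace out) := by unfold Spec_get_top_go_terms; infer_instance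

-- ===== CLAIM (what is proved, stated in full; the proofs are below) =====
def Claim_equal_get_top_go_terms : Prop := ∀ (enrichment_results : List (List (String × String))) (n_terms : Int) (per_namespace : Bool), Dom_get_top_go_terms enrichment_results n_terms per_namespace → Pre_get_top_go_terms enrichment_results n_terms per_namespace → Spec_get_top_go_terms enrichment_results n_terms per_namespace (get_top_go_terms enrichment_results n_terms per_namespace)

-- ===== LEMMAS AND PROOFS =====

-- A's grouping dict, read at key ns, is exactly B's order-preserving filter.
theorem pvGroup_getD (erl : List (List (String × String))) (ns : String) :
    (erl.foldl (fun d r => d.modify (pvNsOf r) [] (· ++ [r]))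
      (PySem.Dict.empty : PySem.Dict String (List (List (String × String))))).getD ns []
      = erl.filter (fun r => pvNsOf r == ns) := by
  have h : erl.foldl (fun d r => d.modify (pvNsOf r) [] (· ++ [r]))
      (PySem.Dict.empty : PySem.Dict String (List (List (String × String))))
      = (erl.map (fun r => (pvNsOf r, r))).foldl
          (fun d p => d.modify p.1 [] (· ++ [p.2])) PySem.Dict.empty := by
    rw [List.foldl_map]
  rw [h, PySem.Dict.getD_foldl_modify_append, PySem.Dict.getD_empty]
  simp [List.filter_map, Function.comp_def]

-- ===== VERDICT (by name: the statement is the Claim_ definition above) =====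
theorem get_top_go_terms_spec : Claim_equal_get_top_go_terms := by
  intro erl n per _ _
  unfold Spec_get_top_go_terms get_top_go_terms get_top_go_terms_alt
  by_cases he : erl = []
  · simp [he]
  · cases per
    · simp [he]
    · simp only [he, if_false, if_true]
      simp only [pvNamespaces, List.foldl_cons, List.foldl_nil, pvGroup_getD,
        PySem.List.foldl_append_singleton_eq_map]
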